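-- pv_equiv track=rewrite | github.com/philipmagar/Kham-Dictionary- | app.py | find_translation
-- ===== SOURCE A (Python) =====
-- def find_translation(word, dictionary):
--     """Find translation for a given English word"""
--     word_lower = word.lower().strip()
--
--     # Precise direct match
--     for key in dictionary.keys():
--         if key.lower() == word_lower:
--             return dictionary[key], key, True
--
--     # Partial match (starting with)
--     for key in dictionary.keys():
--         if key.lower().startswith(word_lower):
--             return dictionary[key], key, True
--
--     # Substring match
--     for key in dictionary.keys():
--         if word_lower in key.lower():
--             return dictionary[key], key, True
--
--     return None, None, False
-- ===== SOURCE B (Python) =====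
-- def find_translation(word, dictionary):
--     """Find translation for a given English word (single pass over the keys)."""
--     word_lower = word.lower().strip()
--     prefix_hit = None
--     sub_hit = None
--     for key in dictionary.keys():
--         k = key.lower()
--         if k == word_lower:
--             return dictionary[key], key, True
--         if prefix_hit is None and k.startswith(word_lower):
--             prefix_hit = (dictionary[key], key)
--         elif sub_hit is None and word_lower in k:
--             sub_hit = (dictionary[key], key)
--     if prefix_hit is not None:
--         return prefix_hit[0], prefix_hit[1], True
--     if sub_hit is not None:
--         return sub_hit[0], sub_hit[1], True
--     return None, None, False
-- ===== Notes on version B (the rewrite author's own statement) =====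
-- stated objective: alternative
-- what changed: Replaces A's three separate scans of the keys (exact, then prefix, then substring) with one single pass that returns immediately on an exact match and records the first prefix and first substring candidates, resolving priority after the loop.
import Mathlib
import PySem

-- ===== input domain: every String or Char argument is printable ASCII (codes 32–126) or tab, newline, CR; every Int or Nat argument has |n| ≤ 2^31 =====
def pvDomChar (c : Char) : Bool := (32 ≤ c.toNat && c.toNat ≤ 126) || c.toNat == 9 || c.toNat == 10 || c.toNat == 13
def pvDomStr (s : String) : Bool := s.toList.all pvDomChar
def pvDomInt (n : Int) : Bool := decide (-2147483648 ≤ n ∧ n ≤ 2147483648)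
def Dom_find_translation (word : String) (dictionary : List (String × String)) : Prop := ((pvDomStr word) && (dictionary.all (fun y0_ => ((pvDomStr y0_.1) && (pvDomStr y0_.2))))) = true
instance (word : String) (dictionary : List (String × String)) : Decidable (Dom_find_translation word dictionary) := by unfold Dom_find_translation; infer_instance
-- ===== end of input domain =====

-- B replaces A's three scans over the keys (exact, then prefix, then substring) with one single pass keeping prefix/substring candidates; same result.


-- ===== PORT A =====
-- The Python argument is a dict; the port builds it with PySem.Dict.ofList and
-- iterates its items, so 'dictionary[key]' is the value paired with key (keys unique).
def ftExact (wl : String) : List (String × String) → Option (Option String × Option String × Bool)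
  | [] => none
  | (k, v) :: rest =>
    if PySem.Str.lower k == wl then some (some v, some k, true) else ftExact wl rest

def ftPrefix (wl : String) : List (String × String) → Option (Option String × Option String × Bool)
  | [] => none
  | (k, v) :: rest =>
    if PySem.Str.startswith (PySem.Str.lower k) wl then some (some v, some k, true) else ftPrefix wl rest

def ftSub (wl : String) : List (String × String) → Option (Option String × Option String × Bool)
  | [] => none
  | (k, v) :: rest =>
    if PySem.Str.isIn wl (PySem.Str.lower k) then some (some v, some k, true) else ftSub wl rest

def find_translation (word : String) (dictionary : List (String × String)) : Option String × Option String × Bool :=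
  let d := PySem.Dict.ofList dictionary
  let wl := PySem.Str.strip (PySem.Str.lower word)
  match ftExact wl d.items with
  | some r => r
  | none =>
    match ftPrefix wl d.items with
    | some r => r
    | none =>
      match ftSub wl d.items with
      | some r => r
      | none => (none, none, false)

-- ===== PORT B =====
-- single pass: immediate return on exact match, first prefix / substring candidates kept
def ftGo (wl : String) (pref sub : Option (String × String)) : List (String × String) → Option String × Option String × Bool
  | [] =>
    match pref with
    | some (v, k) => (some v, some k, true)
    | none =>
      match sub with
      | some (v, k) => (some v, some k, true)
      | none => (none, none, false)
  | (k, v) :: rest =>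
    let kl := PySem.Str.lower k
    if kl == wl then (some v, some k, true)
    else if pref.isNone && PySem.Str.startswith kl wl then ftGo wl (some (v, k)) sub rest
    else if sub.isNone && PySem.Str.isIn wl kl then ftGo wl pref (some (v, k)) rest
    else ftGo wl pref sub rest

def find_translation_alt (word : String) (dictionary : List (String × String)) : Option String × Option String × Bool :=
  let d := PySem.Dict.ofList dictionary
  ftGo (PySem.Str.strip (PySem.Str.lower word)) none none d.items

-- ===== PRECONDITION & SPEC =====
def Spec_find_translation (word : String) (dictionary : List (String × String)) (out : Option String × Option String × Bool) : Prop := out = find_translation_alt word dictionary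
instance (word : String) (dictionary : List (String × String)) (out : Option String × Option String × Bool) : Decidable (Spec_find_translation word dictionary out) := by unfold Spec_find_translation; infer_instance

-- ===== CLAIM (what is proved, stated in full; the proofs are below) =====
def Claim_equal_find_translation : Prop := ∀ (word : String) (dictionary : List (String × String)), Dom_find_translation word dictionary → Spec_find_translation word dictionary (find_translation word dictionary)

-- ===== LEMMAS AND PROOFS =====
-- Invariant of B's single pass: with candidates pref/sub pending, the loop returns
-- the first exact match if any, else the pending prefix candidate (else the first
-- prefix match), else the pending substring candidate (else the first substring match).
theorem ftGo_spec (wl : String) (l : List (String × String)) : ∀ pref sub : Option (String × String),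
    ftGo wl pref sub l =
      match ftExact wl l with
      | some r => r
      | none =>
        match pref with
        | some (v, k) => (some v, some k, true)
        | none =>
          match ftPrefix wl l with
          | some r => r
          | none =>
            match sub with
            | some (v, k) => (some v, some k, true)
            | none =>
              match ftSub wl l with
              | some r => r
              | none => (none, none, false) := by
  induction l with
  | nil => intro pref sub; rcases pref with _ | ⟨pv, pk⟩ <;> rcases sub with _ | ⟨sv, sk⟩ <;>
      simp [ftGo, ftExact, ftPrefix, ftSub]
  | cons h rest ih =>
    obtain ⟨k, v⟩ := h
    intro pref sub
    by_cases he : (PySem.Str.lower k == wl) = true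
    · simp [ftGo, ftExact, he]
    · by_cases hp : PySem.Chars.startswith (PySem.Chars.lower k.toList) wl.toList = true
      · rcases pref with _ | ⟨pv, pk⟩
        · simp [ftGo, ftExact, ftPrefix, he, hp, ih]
        · by_cases hs : PySem.Chars.isIn wl.toList (PySem.Chars.lower k.toList) = true <;>
            rcases sub with _ | ⟨sv, sk⟩ <;>
            simp [ftGo, ftExact, ftPrefix, he, hp, hs, ih]
      · by_cases hs : PySem.Chars.isIn wl.toList (PySem.Chars.lower k.toList) = true
        · rcases sub with _ | ⟨sv, sk⟩ <;> rcases pref with _ | ⟨pv, pk⟩ <;>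
            simp [ftGo, ftExact, ftPrefix, ftSub, he, hp, hs, ih]
        · rcases sub with _ | ⟨sv, sk⟩ <;> rcases pref with _ | ⟨pv, pk⟩ <;>
            simp [ftGo, ftExact, ftPrefix, ftSub, he, hp, hs, ih]

-- ===== VERDICT (by name: the statement is the Claim_ definition above) =====
theorem find_translation_spec : Claim_equal_find_translation := by
  intro word dictionary _
  unfold Spec_find_translation find_translation find_translation_alt
  rw [ftGo_spec]
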